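-- pv_equiv track=rewrite | github.com/RascalTwo/DailyProblem | problems/DailyCoding/257/solve.py | solve
-- ===== SOURCE A (Python) =====
-- from typing import List, Tuple
--
-- def solve(integers: List[int]):
-- 	goal = sorted(integers)
--
-- 	best_window: Tuple[int, int] = (0, len(integers) - 1)
-- 	for i in range(len(integers) - 1):
-- 		for j in range(i + 1, len(integers)):
-- 			sorted_window = sorted(integers[i:j + 1])
-- 			if integers[i:j + 1] == sorted_window:
-- 				continue
--
-- 			partial_sorted = integers[:]
-- 			partial_sorted[i:j + 1] = sorted_window
-- 			if partial_sorted == goal and j - i < best_window[1] - best_window[0]: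
-- 				best_window = i, j
--
-- 	return best_window
-- ===== SOURCE B (Python) =====
-- def solve(integers):
--     goal = sorted(integers)
--     mismatched = [i for i, (x, y) in enumerate(zip(integers, goal)) if x != y]
--     if not mismatched:
--         return (0, len(integers) - 1)
--     return (mismatched[0], mismatched[-1])
-- ===== Notes on version B (the rewrite author's own statement) =====
-- stated objective: faster
-- what changed: Replaces the O(n^3 log n) scan over all windows (sorting each and testing whether splicing it in sorts the array) by one sort plus a single comparison pass against the sorted array: the answer is the first and last position where the array differs from its sorted version.
import Mathlib
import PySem

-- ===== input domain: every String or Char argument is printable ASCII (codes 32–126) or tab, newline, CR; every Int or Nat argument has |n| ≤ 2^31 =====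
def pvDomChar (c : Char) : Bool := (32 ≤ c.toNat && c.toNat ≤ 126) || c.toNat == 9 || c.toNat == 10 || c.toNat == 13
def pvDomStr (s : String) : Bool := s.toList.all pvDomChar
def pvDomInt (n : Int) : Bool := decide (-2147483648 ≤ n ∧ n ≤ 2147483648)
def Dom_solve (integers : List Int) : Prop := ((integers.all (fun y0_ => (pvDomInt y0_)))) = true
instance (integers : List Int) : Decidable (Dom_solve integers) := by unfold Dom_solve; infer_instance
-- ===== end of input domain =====

-- B replaces A's cubic all-windows search by one sort plus a single mismatch scan (same result, proved below).

-- ===== PORT A =====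
-- Literal transliteration of A: goal = sorted(integers); nested loops over all windows (i, j);
-- the slice assignment partial_sorted[i:j+1] = sorted_window (equal length) is the splice
-- integers[:i] ++ sorted_window ++ integers[j+1:].
def solve (integers : List Int) : Int × Int :=
  let goal := PySem.List.sorted integers (fun x => x) false
  let n : Int := integers.length
  (PySem.List.pyRange 0 (n - 1) 1).foldl
    (fun best i =>
      (PySem.List.pyRange (i + 1) n 1).foldl
        (fun best j =>
          let window := PySem.List.slice integers (some i) (some (j + 1))
          let sorted_window := PySem.List.sorted window (fun x => x) false
          if window = sorted_window then best
          else
            let partial_sorted :=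
              PySem.List.slice integers none (some i) ++ sorted_window ++
                PySem.List.slice integers (some (j + 1)) none
            if partial_sorted = goal ∧ j - i < best.2 - best.1 then (i, j) else best)
        best)
    (0, n - 1)

-- ===== PORT B =====
-- B: goal = sorted(integers); mismatched = [i for i, (x, y) in enumerate(zip(integers, goal)) if x != y];
-- return (0, len-1) if no mismatch else (mismatched[0], mismatched[-1]).
def solve_alt (integers : List Int) : Int × Int :=
  let goal := PySem.List.sorted integers (fun x => x) false
  let mismatched := (PySem.List.enumerate (integers.zip goal) 0).filterMap
    (fun p => if p.2.1 ≠ p.2.2 then some p.1 else none)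
  match mismatched with
  | [] => (0, (integers.length : Int) - 1)
  | x :: rest => (x, rest.getLastD x)

-- ===== PRECONDITION & SPEC =====
def Spec_solve (integers : List Int) (out : Int × Int) : Prop := out = solve_alt integers
instance (integers : List Int) (out : Int × Int) : Decidable (Spec_solve integers out) := by unfold Spec_solve; infer_instance

-- ===== CLAIM (what is proved, stated in full; the proofs are below) =====
def Claim_equal_solve : Prop := ∀ (integers : List Int), Dom_solve integers → Spec_solve integers (solve integers)

-- ===== LEMMAS AND PROOFS =====

-- The mismatch-index list: positions (in increasing order) where a differs from g.
def misList (a g : List Int) : List Nat :=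
  (List.range a.length).filter (fun k => decide (a[k]? ≠ g[k]?))

theorem misList_cons (x y : Int) (xs ys : List Int) :
    misList (x :: xs) (y :: ys)
      = (if x = y then [] else [0]) ++ (misList xs ys).map Nat.succ := by
  simp only [misList, List.length_cons, List.range_succ_eq_map, List.filter_cons,
    List.filter_map]
  by_cases h : x = y
  · simp only [h, Function.comp_def, Nat.succ_eq_add_one]
    simp
  · simp only [Function.comp_def, Nat.succ_eq_add_one]
    simp [h]

-- B's comprehension computes exactly the mismatch indices (as Ints), shifted by the start.
theorem filterMap_enumerate_zip (a : List Int) : ∀ (g : List Int) (s : Nat),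
    a.length = g.length →
    (PySem.List.enumerate (a.zip g) (s : Int)).filterMap
        (fun p => if p.2.1 ≠ p.2.2 then some p.1 else none)
      = (misList a g).map (fun k => ((s + k : Nat) : Int)) := by
  induction a with
  | nil => intro g s _; simp [misList]
  | cons x xs ih =>
    intro g s hlen
    cases g with
    | nil => simp at hlen
    | cons y ys =>
      have hlen' : xs.length = ys.length := by simpa using hlen
      have hrec := ih ys (s + 1) hlen'
      have hcast : ((s : Int) + 1) = ((s + 1 : Nat) : Int) := by push_cast; ring
      simp only [List.zip_cons_cons, PySem.List.enumerate_cons, List.filterMap_cons]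
      rw [hcast, hrec, misList_cons]
      by_cases hxy : x = y
      · simp [hxy]
        intro a _
        omega
      · simp [hxy]
        intro a _
        omega

-- Membership in misList.
theorem mem_misList {a g : List Int} {k : Nat} :
    k ∈ misList a g ↔ k < a.length ∧ a[k]? ≠ g[k]? := by
  simp [misList, List.mem_filter, List.mem_range]

theorem misList_pairwise (a g : List Int) : (misList a g).Pairwise (· < ·) :=
  List.Pairwise.filter _ (List.pairwise_lt_range)

-- In a strictly increasing list, the last element is the maximum.
theorem le_getLastD_of_pairwise : ∀ (L : List Nat), L.Pairwise (· < ·) →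
    ∀ d, ∀ k ∈ L, k ≤ L.getLastD d := by
  intro L
  induction L with
  | nil => simp
  | cons x xs ih =>
    intro hp d k hk
    rw [List.pairwise_cons] at hp
    rw [List.mem_cons] at hk
    cases xs with
    | nil =>
      rcases hk with rfl | hk
      · simp
      · simp at hk
    | cons y ys =>
      have htail : ∀ m ∈ y :: ys, m ≤ (y :: ys).getLastD x := ih hp.2 x
      rw [List.getLastD_cons]
      rcases hk with rfl | hk
      · exact le_of_lt (lt_of_lt_of_le (hp.1 y (by simp)) (htail y (by simp)))
      · exact htail k hk

-- misList empty iff the lists (of equal length) are equal.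
theorem misList_nil_iff {a g : List Int} (hlen : a.length = g.length) :
    misList a g = [] ↔ a = g := by
  constructor
  · intro h
    apply List.ext_getElem?
    intro k
    by_cases hk : k < a.length
    · by_contra hne
      have : k ∈ misList a g := mem_misList.mpr ⟨hk, hne⟩
      simp [h] at this
    · rw [List.getElem?_eq_none (by omega), List.getElem?_eq_none (by omega)]
  · intro h; subst h
    simp [misList]

-- ---- the generic "best window" fold ----

def bstep (l r : Int) (b p : Int × Int) : Int × Int :=
  if p.1 ≤ l ∧ r ≤ p.2 ∧ p.2 - p.1 < b.2 - b.1 then p else b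

def binv (l r : Int) (b : Int × Int) : Prop :=
  r - l ≤ b.2 - b.1 ∧ (b.2 - b.1 = r - l → b = (l, r))

theorem binv_foldl (l r : Int) : ∀ (L : List (Int × Int)) (b : Int × Int),
    binv l r b → binv l r (L.foldl (bstep l r) b) := by
  intro L
  induction L with
  | nil => intro b hb; exact hb
  | cons p ps ih =>
    intro b hb
    apply ih
    unfold bstep
    split_ifs with h
    · refine ⟨by omega, fun he => ?_⟩
      have : p.1 = l ∧ p.2 = r := by omega
      exact Prod.ext this.1 this.2
    · exact hb

theorem bstep_fixed (l r : Int) (p : Int × Int) :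
    bstep l r (l, r) p = (l, r) := by
  unfold bstep
  split_ifs with h
  · exfalso; simp at h; omega
  · rfl

theorem foldl_bstep_fixed (l r : Int) : ∀ (L : List (Int × Int)),
    L.foldl (bstep l r) (l, r) = (l, r) := by
  intro L
  induction L with
  | nil => rfl
  | cons p ps ih => rw [List.foldl_cons, bstep_fixed l r p, ih]

theorem foldl_bstep_eq (l r : Int) (L : List (Int × Int))
    (hmem : (l, r) ∈ L) (b : Int × Int) (hb : binv l r b) :
    L.foldl (bstep l r) b = (l, r) := by
  obtain ⟨L1, L2, rfl⟩ := List.append_of_mem hmem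
  rw [List.foldl_append, List.foldl_cons]
  have h1 := binv_foldl l r L1 b hb
  set b1 := L1.foldl (bstep l r) b with hb1
  have hstep : bstep l r b1 (l, r) = (l, r) := by
    unfold bstep
    split_ifs with h
    · rfl
    · simp only [le_refl, true_and, not_lt] at h
      have : b1.2 - b1.1 = r - l := le_antisymm h h1.1
      rw [h1.2 this]
  rw [hstep, foldl_bstep_fixed l r]

-- Flatten a nested fold over pairs.
theorem foldl_nested_flat (step : (Int × Int) → (Int × Int) → (Int × Int)) :
    ∀ (is : List Int) (f : Int → List Int) (b : Int × Int),
    is.foldl (fun b i => (f i).foldl (fun b j => step b (i, j)) b) b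
      = (is.flatMap (fun i => (f i).map (fun j => (i, j)))).foldl step b := by
  intro is
  induction is with
  | nil => intro f b; rfl
  | cons i it ih =>
    intro f b
    simp only [List.flatMap_cons, List.foldl_append, List.foldl_cons, List.foldl_map]
    rw [ih]

-- ---- characterization of A's eligibility test ----

-- Splitting a list at i and j+1.
theorem split_window (a : List Int) (i j : Nat) (hij : i < j) :
    a = a.take i ++ (a.drop i).take (j + 1 - i) ++ a.drop (j + 1) := by
  rw [List.append_assoc]
  conv_lhs => rw [← List.take_append_drop i a]
  congr 1
  conv_lhs => rw [← List.take_append_drop (j + 1 - i) (a.drop i)]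
  congr 1
  rw [List.drop_drop]
  congr 1
  omega

-- Key: if a and g agree outside [l, r] and are permutations, the window [i, j] ⊇ [l, r]
-- sorted and spliced back gives g.
theorem splice_eq_goal (a g : List Int) (hperm : a.Perm g)
    (hg : g.Pairwise (· ≤ ·)) (l r : Nat)
    (hfirst : ∀ k, k < l → a[k]? = g[k]?) (hlast : ∀ k, r < k → a[k]? = g[k]?)
    (i j : Nat) (hij : i < j) (hil : i ≤ l) (hrj : r ≤ j) :
    a.take i ++ PySem.List.sorted ((a.drop i).take (j + 1 - i)) (fun x => x) false
      ++ a.drop (j + 1) = g := by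
  have htake : g.take i = a.take i := by
    apply List.ext_getElem?
    intro k
    by_cases hk : k < i
    · rw [List.getElem?_take_of_lt hk, List.getElem?_take_of_lt hk, hfirst k (by omega)]
    · rw [List.getElem?_eq_none, List.getElem?_eq_none] <;> simp [List.length_take] <;> omega
  have hdrop : g.drop (j + 1) = a.drop (j + 1) := by
    apply List.ext_getElem?
    intro k
    rw [List.getElem?_drop, List.getElem?_drop, hlast (j + 1 + k) (by omega)]
  have hgsplit : g = a.take i ++ (g.drop i).take (j + 1 - i) ++ a.drop (j + 1) := by
    have := split_window g i j hij
    rw [htake, hdrop] at this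
    exact this
  have hasplit := split_window a i j hij
  -- middle parts are permutations of each other
  have hmid : ((g.drop i).take (j + 1 - i)).Perm ((a.drop i).take (j + 1 - i)) := by
    have hp : (a.take i ++ ((a.drop i).take (j + 1 - i) ++ a.drop (j + 1))).Perm
        (a.take i ++ ((g.drop i).take (j + 1 - i) ++ a.drop (j + 1))) := by
      rw [← List.append_assoc, ← List.append_assoc, ← hasplit, ← hgsplit]
      exact hperm
    have hp2 : ((a.drop i).take (j + 1 - i) ++ a.drop (j + 1)).Perm
        ((g.drop i).take (j + 1 - i) ++ a.drop (j + 1)) :=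
      (List.perm_append_left_iff _).mp hp
    exact ((List.perm_append_right_iff _).mp hp2).symm
  have hmidsorted : ((g.drop i).take (j + 1 - i)).Pairwise (· ≤ ·) :=
    hg.sublist ((List.take_sublist _ _).trans (List.drop_sublist _ _))
  have hsorted_eq : PySem.List.sorted ((a.drop i).take (j + 1 - i)) (fun x => x) false
      = (g.drop i).take (j + 1 - i) :=
    PySem.List.sorted_id_eq_of_perm_of_pairwise _ _ hmid hmidsorted
  rw [hsorted_eq, ← hgsplit]

-- Small helpers.
theorem getLastD_mem : ∀ (xs : List Nat) (x : Nat), xs.getLastD x ∈ x :: xs := by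
  intro xs
  induction xs with
  | nil => intro x; simp
  | cons y ys ih =>
    intro x
    rw [List.getLastD_cons]
    exact List.mem_cons_of_mem x (ih y)

theorem getLastD_map (f : Nat → Int) : ∀ (tl : List Nat) (l : Nat),
    (tl.map f).getLastD (f l) = f (tl.getLastD l) := by
  intro tl
  induction tl with
  | nil => intro l; rfl
  | cons y ys ih => intro l; rw [List.map_cons, List.getLastD_cons, List.getLastD_cons, ih]

theorem foldl_const : ∀ (L : List Int) (b : Int × Int), L.foldl (fun b _ => b) b = b := by
  intro L
  induction L with
  | nil => intro b; rfl
  | cons x xs ih => intro b; rw [List.foldl_cons]; exact ih b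

-- If a and g agree everywhere except possibly at l and are permutations, they agree at l too.
theorem single_mismatch_absurd (a g : List Int) (hperm : a.Perm g) (hlen : a.length = g.length)
    (l : Nat) (hl : l < a.length) (hagree : ∀ k, k ≠ l → a[k]? = g[k]?) :
    a[l]? = g[l]? := by
  have hl' : l < g.length := by omega
  have hadec : a = a.take l ++ a[l] :: a.drop (l + 1) := by
    conv_lhs => rw [← List.take_append_drop l a]
    rw [List.getElem_cons_drop hl]
  have hgdec : g = g.take l ++ g[l] :: g.drop (l + 1) := by
    conv_lhs => rw [← List.take_append_drop l g]
    rw [List.getElem_cons_drop hl']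
  have htake : a.take l = g.take l := by
    apply List.ext_getElem?
    intro k
    by_cases hk : k < l
    · rw [List.getElem?_take_of_lt hk, List.getElem?_take_of_lt hk, hagree k (by omega)]
    · rw [List.getElem?_eq_none, List.getElem?_eq_none] <;> simp [List.length_take] <;> omega
  have hdrop : a.drop (l + 1) = g.drop (l + 1) := by
    apply List.ext_getElem?
    intro k
    rw [List.getElem?_drop, List.getElem?_drop, hagree (l + 1 + k) (by omega)]
  have hperm2 : (a[l] :: a.drop (l + 1)).Perm (g[l] :: a.drop (l + 1)) := by
    have h0 : (a.take l ++ a[l] :: a.drop (l + 1)).Perm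
        (a.take l ++ g[l] :: a.drop (l + 1)) := by
      rw [← hadec, htake, hdrop, ← hgdec]
      exact hperm
    exact (List.perm_append_left_iff _).mp h0
  have hcount := hperm2.count_eq a[l]
  rw [List.count_cons, List.count_cons] at hcount
  have heq : a[l] = g[l] := by
    by_contra hne
    simp at hcount
    exact hne hcount.symm
  rw [List.getElem?_eq_getElem hl, List.getElem?_eq_getElem hl', heq]

-- Converse: if the splice equals g then the window covers both mismatch positions.
theorem splice_bounds (a g : List Int) (l r : Nat)
    (hla : a[l]? ≠ g[l]?) (hra : a[r]? ≠ g[r]?)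
    (i j : Nat) (hij : i < j) (hj : j < a.length)
    (hps : a.take i ++ PySem.List.sorted ((a.drop i).take (j + 1 - i)) (fun x => x) false
      ++ a.drop (j + 1) = g) :
    i ≤ l ∧ r ≤ j := by
  have hti : (a.take i).length = i := by simp [List.length_take]; omega
  have htw : (PySem.List.sorted ((a.drop i).take (j + 1 - i)) (fun x => x) false).length
      = j + 1 - i := by
    rw [PySem.List.length_sorted]
    simp [List.length_take, List.length_drop]
    omega
  constructor
  · by_contra h
    have hli : l < i := by omega
    have : g[l]? = a[l]? := by
      rw [← hps, List.getElem?_append_left (by rw [List.length_append]; omega),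
        List.getElem?_append_left (by omega), List.getElem?_take_of_lt hli]
    exact hla this.symm
  · by_contra h
    have hjr : j < r := by omega
    have hlen2 : (a.take i ++ PySem.List.sorted ((a.drop i).take (j + 1 - i))
        (fun x => x) false).length = j + 1 := by
      rw [List.length_append, hti, htw]; omega
    have : g[r]? = a[r]? := by
      rw [← hps, List.getElem?_append_right (by rw [hlen2]; omega), hlen2,
        List.getElem?_drop]
      congr 1
      omega
    exact hra this.symm

-- A's inner-loop body is exactly the bstep update, for indices in range.
theorem stepA_eq (a g : List Int) (hperm : a.Perm g)
    (hg : g.Pairwise (· ≤ ·)) (l r : Nat)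
    (hla : a[l]? ≠ g[l]?) (hra : a[r]? ≠ g[r]?)
    (hfirst : ∀ k, k < l → a[k]? = g[k]?) (hlast : ∀ k, r < k → a[k]? = g[k]?)
    (b : Int × Int) (i j : Int) (hi : 0 ≤ i) (hij : i < j) (hj : j < (a.length : Int)) :
    (if PySem.List.slice a (some i) (some (j + 1))
        = PySem.List.sorted (PySem.List.slice a (some i) (some (j + 1))) (fun x => x) false
      then b
      else
        if PySem.List.slice a none (some i)
            ++ PySem.List.sorted (PySem.List.slice a (some i) (some (j + 1))) (fun x => x) false
            ++ PySem.List.slice a (some (j + 1)) none = g ∧ j - i < b.2 - b.1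
        then (i, j) else b)
      = bstep (l : Int) (r : Int) b (i, j) := by
  obtain ⟨i', rfl⟩ : ∃ i' : Nat, i = (i' : Int) := ⟨i.toNat, (Int.toNat_of_nonneg hi).symm⟩
  obtain ⟨j', rfl⟩ : ∃ j' : Nat, j = (j' : Int) := ⟨j.toNat, (Int.toNat_of_nonneg (by omega)).symm⟩
  have hij' : i' < j' := by exact_mod_cast hij
  have hj' : j' < a.length := by exact_mod_cast hj
  have hcast1 : ((j' : Int) + 1) = ((j' + 1 : Nat) : Int) := by push_cast; ring
  have hw : PySem.List.slice a (some (i' : Int)) (some ((j' : Int) + 1))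
      = (a.drop i').take (j' + 1 - i') := by
    rw [hcast1, PySem.List.slice_natCast]
  have ht : PySem.List.slice a none (some (i' : Int)) = a.take i' :=
    PySem.List.slice_to_natCast a i'
  have hd : PySem.List.slice a (some ((j' : Int) + 1)) none = a.drop (j' + 1) := by
    rw [hcast1]
    exact PySem.List.slice_from_natCast a (j' + 1)
  rw [hw, ht, hd]
  by_cases hbound : i' ≤ l ∧ r ≤ j'
  · have hps := splice_eq_goal a g hperm hg l r hfirst hlast i' j' hij'
      hbound.1 hbound.2
    have hwne : ¬ ((a.drop i').take (j' + 1 - i')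
        = PySem.List.sorted ((a.drop i').take (j' + 1 - i')) (fun x => x) false) := by
      intro he
      apply hla
      have hag : a = g := by
        calc a = a.take i' ++ (a.drop i').take (j' + 1 - i') ++ a.drop (j' + 1) :=
              split_window a i' j' hij'
          _ = a.take i' ++ PySem.List.sorted ((a.drop i').take (j' + 1 - i'))
                (fun x => x) false ++ a.drop (j' + 1) := by rw [← he]
          _ = g := hps
      rw [hag]
    rw [if_neg hwne]
    have hc1 : ((i' : Int) ≤ (l : Int)) := by exact_mod_cast hbound.1
    have hc2 : ((r : Int) ≤ (j' : Int)) := by exact_mod_cast hbound.2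
    simp only [bstep, hps, true_and, hc1, hc2]
  · have hpsne : ¬ (a.take i' ++ PySem.List.sorted ((a.drop i').take (j' + 1 - i'))
        (fun x => x) false ++ a.drop (j' + 1) = g) := by
      intro he
      exact hbound (splice_bounds a g l r hla hra i' j' hij' hj' he)
    have hbf : ¬ (((i' : Int) ≤ (l : Int)) ∧ ((r : Int) ≤ (j' : Int))
        ∧ (j' : Int) - (i' : Int) < b.2 - b.1) := by
      intro h
      exact hbound ⟨by exact_mod_cast h.1, by exact_mod_cast h.2.1⟩
    rw [bstep, if_neg hbf]
    split_ifs with h1 h2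
    · rfl
    · exact absurd h2.1 hpsne
    · rfl

-- A returns (first mismatch, last mismatch) when the array is not sorted.
theorem solve_eq_of_mis (a : List Int) (l : Nat) (tl : List Nat)
    (hM : misList a (PySem.List.sorted a (fun x => x) false) = l :: tl) :
    solve a = ((l : Int), ((tl.getLastD l : Nat) : Int)) := by
  have hlen : a.length = (PySem.List.sorted a (fun x => x) false).length :=
    (PySem.List.length_sorted a (fun x => x) false).symm
  have hperm : a.Perm (PySem.List.sorted a (fun x => x) false) :=
    (PySem.List.sorted_perm a (fun x => x) false).symm
  have hg : (PySem.List.sorted a (fun x => x) false).Pairwise (· ≤ ·) :=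
    PySem.List.sorted_pairwise a (fun x => x)
  have hpair := misList_pairwise a (PySem.List.sorted a (fun x => x) false)
  rw [hM, List.pairwise_cons] at hpair
  have hlmem : l ∈ misList a (PySem.List.sorted a (fun x => x) false) := by
    rw [hM]; exact List.mem_cons_self
  have hrmem : tl.getLastD l ∈ misList a (PySem.List.sorted a (fun x => x) false) := by
    rw [hM]; exact getLastD_mem tl l
  obtain ⟨hl, hla⟩ := mem_misList.mp hlmem
  obtain ⟨hr, hra⟩ := mem_misList.mp hrmem
  have hmax : ∀ k ∈ l :: tl, k ≤ tl.getLastD l := by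
    intro k hk
    have := le_getLastD_of_pairwise (l :: tl) (by rw [List.pairwise_cons]; exact hpair) 0 k hk
    rwa [List.getLastD_cons] at this
  have hfirst : ∀ k, k < l →
      a[k]? = (PySem.List.sorted a (fun x => x) false)[k]? := by
    intro k hk
    by_contra hne
    have hkm : k ∈ misList a (PySem.List.sorted a (fun x => x) false) :=
      mem_misList.mpr ⟨by omega, hne⟩
    rw [hM, List.mem_cons] at hkm
    rcases hkm with rfl | hkm
    · omega
    · exact absurd (hpair.1 k hkm) (by omega)
  have hlast : ∀ k, tl.getLastD l < k →
      a[k]? = (PySem.List.sorted a (fun x => x) false)[k]? := by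
    intro k hk
    by_cases hkn : k < a.length
    · by_contra hne
      have hkm : k ∈ misList a (PySem.List.sorted a (fun x => x) false) :=
        mem_misList.mpr ⟨hkn, hne⟩
      rw [hM] at hkm
      exact absurd (hmax k hkm) (by omega)
    · rw [List.getElem?_eq_none (by omega), List.getElem?_eq_none (by omega)]
  have hlr : l < tl.getLastD l := by
    have hle : l ≤ tl.getLastD l := hmax l List.mem_cons_self
    rcases lt_or_eq_of_le hle with h | h
    · exact h
    · exfalso
      apply hla
      apply single_mismatch_absurd a (PySem.List.sorted a (fun x => x) false) hperm hlen l hl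
      intro k hk
      rcases Nat.lt_or_ge k l with hkl | hkl
      · exact hfirst k hkl
      · exact hlast k (by omega)
  -- now evaluate A's fold
  simp only [solve]
  have hinner : ∀ (b : Int × Int) (i : Int),
      i ∈ PySem.List.pyRange 0 ((a.length : Int) - 1) 1 →
      (PySem.List.pyRange (i + 1) (a.length : Int) 1).foldl
        (fun best j =>
          if PySem.List.slice a (some i) (some (j + 1))
              = PySem.List.sorted (PySem.List.slice a (some i) (some (j + 1))) (fun x => x) false
            then best
            else
              if PySem.List.slice a none (some i)
                  ++ PySem.List.sorted (PySem.List.slice a (some i) (some (j + 1)))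
                    (fun x => x) false
                  ++ PySem.List.slice a (some (j + 1)) none
                  = PySem.List.sorted a (fun x => x) false ∧ j - i < best.2 - best.1
              then (i, j) else best) b
      = (PySem.List.pyRange (i + 1) (a.length : Int) 1).foldl
          (fun best j => bstep (l : Int) ((tl.getLastD l : Nat) : Int) best (i, j)) b := by
    intro b i hi
    rw [PySem.List.mem_pyRange_one] at hi
    apply List.foldl_ext
    intro b' j hj
    rw [PySem.List.mem_pyRange_one] at hj
    exact stepA_eq a (PySem.List.sorted a (fun x => x) false) hperm hg l
      (tl.getLastD l) hla hra hfirst hlast b' i j hi.1 (by omega) hj.2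
  rw [List.foldl_ext _ _ _ hinner]
  rw [foldl_nested_flat]
  apply foldl_bstep_eq
  · simp only [List.mem_flatMap, List.mem_map, PySem.List.mem_pyRange_one]
    refine ⟨(l : Int), ⟨by omega, ?_⟩, (tl.getLastD l : Int), ⟨by omega, by omega⟩, rfl⟩
    have : (l : Int) < (tl.getLastD l : Int) := by exact_mod_cast hlr
    have : ((tl.getLastD l : Nat) : Int) < (a.length : Int) := by exact_mod_cast hr
    omega
  · constructor
    · simp only []
      have : ((tl.getLastD l : Nat) : Int) < (a.length : Int) := by exact_mod_cast hr
      have : (0 : Int) ≤ (l : Int) := by positivity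
      omega
    · intro he
      simp only [] at he
      have h1 : ((tl.getLastD l : Nat) : Int) < (a.length : Int) := by exact_mod_cast hr
      have h2 : (0 : Int) ≤ (l : Int) := by positivity
      have h3 : (l : Int) < ((tl.getLastD l : Nat) : Int) := by exact_mod_cast hlr
      have hl0 : (l : Int) = 0 := by omega
      have hr0 : ((tl.getLastD l : Nat) : Int) = (a.length : Int) - 1 := by omega
      rw [hl0, hr0]

-- B returns (first mismatch, last mismatch) when the array is not sorted.
theorem solve_alt_eq_of_mis (a : List Int) (l : Nat) (tl : List Nat)
    (hM : misList a (PySem.List.sorted a (fun x => x) false) = l :: tl) :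
    solve_alt a = ((l : Int), ((tl.getLastD l : Nat) : Int)) := by
  have hlen : a.length = (PySem.List.sorted a (fun x => x) false).length :=
    (PySem.List.length_sorted a (fun x => x) false).symm
  simp only [solve_alt]
  have hz := filterMap_enumerate_zip a (PySem.List.sorted a (fun x => x) false) 0 hlen
  rw [hM] at hz
  simp only [Nat.cast_zero, Nat.zero_add, List.map_cons, Nat.zero_add] at hz
  rw [hz]
  exact congrArg (Prod.mk ((l : Nat) : Int)) (getLastD_map (fun k => (k : Int)) tl l)

-- When the array is already sorted, both sides return the default (0, n - 1).
theorem solve_eq_of_nil (a : List Int)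
    (hM : misList a (PySem.List.sorted a (fun x => x) false) = []) :
    solve a = (0, (a.length : Int) - 1) := by
  have hlen : a.length = (PySem.List.sorted a (fun x => x) false).length :=
    (PySem.List.length_sorted a (fun x => x) false).symm
  have hag : a = PySem.List.sorted a (fun x => x) false := (misList_nil_iff hlen).mp hM
  have hap : a.Pairwise (· ≤ ·) := by
    rw [hag]
    exact PySem.List.sorted_pairwise a (fun x => x)
  simp only [solve]
  have hinner : ∀ (b : Int × Int) (i : Int),
      i ∈ PySem.List.pyRange 0 ((a.length : Int) - 1) 1 →
      (PySem.List.pyRange (i + 1) (a.length : Int) 1).foldl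
        (fun best j =>
          if PySem.List.slice a (some i) (some (j + 1))
              = PySem.List.sorted (PySem.List.slice a (some i) (some (j + 1))) (fun x => x) false
            then best
            else
              if PySem.List.slice a none (some i)
                  ++ PySem.List.sorted (PySem.List.slice a (some i) (some (j + 1)))
                    (fun x => x) false
                  ++ PySem.List.slice a (some (j + 1)) none
                  = PySem.List.sorted a (fun x => x) false ∧ j - i < best.2 - best.1
              then (i, j) else best) b
      = (PySem.List.pyRange (i + 1) (a.length : Int) 1).foldl (fun b _ => b) b := by
    intro b i hi
    rw [PySem.List.mem_pyRange_one] at hi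
    apply List.foldl_ext
    intro b' j hj
    rw [PySem.List.mem_pyRange_one] at hj
    have hwp : (PySem.List.slice a (some i) (some (j + 1))).Pairwise (· ≤ ·) := by
      obtain ⟨i', rfl⟩ : ∃ i' : Nat, i = (i' : Int) :=
        ⟨i.toNat, (Int.toNat_of_nonneg hi.1).symm⟩
      obtain ⟨j', rfl⟩ : ∃ j' : Nat, j = (j' : Int) :=
        ⟨j.toNat, (Int.toNat_of_nonneg (by omega)).symm⟩
      have : ((j' : Int) + 1) = ((j' + 1 : Nat) : Int) := by push_cast; ring
      rw [this, PySem.List.slice_natCast]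
      exact hap.sublist ((List.take_sublist _ _).trans (List.drop_sublist _ _))
    rw [if_pos (PySem.List.sorted_eq_self_of_pairwise _ _ hwp).symm]
  rw [List.foldl_ext _ _ _ hinner]
  have : ∀ (b : Int × Int),
      (PySem.List.pyRange 0 ((a.length : Int) - 1) 1).foldl
        (fun b i => (PySem.List.pyRange (i + 1) (a.length : Int) 1).foldl (fun b _ => b) b) b
      = b := by
    intro b
    have h1 : ∀ (b : Int × Int) (i : Int),
        i ∈ PySem.List.pyRange 0 ((a.length : Int) - 1) 1 →
        (PySem.List.pyRange (i + 1) (a.length : Int) 1).foldl (fun b _ => b) b = b := by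
      intro b i _
      exact foldl_const _ b
    rw [List.foldl_ext _ (fun b _ => b) _ h1]
    exact foldl_const _ b
  exact this (0, (a.length : Int) - 1)

theorem solve_alt_eq_of_nil (a : List Int)
    (hM : misList a (PySem.List.sorted a (fun x => x) false) = []) :
    solve_alt a = (0, (a.length : Int) - 1) := by
  have hlen : a.length = (PySem.List.sorted a (fun x => x) false).length :=
    (PySem.List.length_sorted a (fun x => x) false).symm
  simp only [solve_alt]
  have hz := filterMap_enumerate_zip a (PySem.List.sorted a (fun x => x) false) 0 hlen
  rw [hM] at hz
  simp only [List.map_nil, Nat.cast_zero] at hz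
  rw [hz]

theorem solve_eq_alt (a : List Int) : solve a = solve_alt a := by
  cases hM : misList a (PySem.List.sorted a (fun x => x) false) with
  | nil => rw [solve_eq_of_nil a hM, solve_alt_eq_of_nil a hM]
  | cons l tl => rw [solve_eq_of_mis a l tl hM, solve_alt_eq_of_mis a l tl hM]

-- ===== VERDICT (by name: the statement is the Claim_ definition above) =====
theorem solve_spec : Claim_equal_solve := by
  intro a _
  unfold Spec_solve
  exact solve_eq_alt a
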